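-- pv_equiv track=rewrite | github.com/gabemahoney/bees | batch_fix_tests.py | transform_test_function
-- ===== SOURCE A (Python) =====
-- def transform_test_function(func_text: str) -> str:
--     """Transform a single test function to use flat storage."""
--
--     # Check if function uses tmp_path and monkeypatch
--     if 'tmp_path' not in func_text or 'monkeypatch' not in func_text:
--         return func_text
--
--     # Check if already has monkeypatch.chdir
--     if 'monkeypatch.chdir(tmp_path)' in func_text:
--         return func_text
--
--     # Add monkeypatch.chdir after function signature
--     lines = func_text.split('\n')
--     new_lines = []
--     added_chdir = False
--
--     for i, line in enumerate(lines):
--         new_lines.append(line)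
--
--         # Add chdir after docstring and before first real code
--         if not added_chdir and line.strip().endswith('"""') and i > 0:
--             # This is likely the end of docstring
--             indent = len(line) - len(line.lstrip())
--             new_lines.append(' ' * indent + 'import json')
--             new_lines.append(' ' * indent + 'monkeypatch.chdir(tmp_path)')
--             new_lines.append('')
--             added_chdir = True
--
--     return '\n'.join(new_lines)
-- ===== SOURCE B (Python) =====
-- def transform_test_function(func_text: str) -> str:
--     """Transform a single test function to use flat storage."""
--     if 'tmp_path' not in func_text or 'monkeypatch' not in func_text:
--         return func_text
--     if 'monkeypatch.chdir(tmp_path)' in func_text: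
--         return func_text
--     lines = func_text.split('\n')
--     # locate the first line (beyond the first) that ends the docstring
--     hit = next(((i, l) for i, l in enumerate(lines)
--                 if i > 0 and l.strip().endswith('"""')), None)
--     if hit is None:
--         return '\n'.join(lines)
--     i, line = hit
--     pad = ' ' * (len(line) - len(line.lstrip()))
--     return '\n'.join(lines[:i + 1]
--                      + [pad + 'import json', pad + 'monkeypatch.chdir(tmp_path)', '']
--                      + lines[i + 1:])
-- ===== Notes on version B (the rewrite author's own statement) =====
-- stated objective: alternative
-- what changed: Replaces A's single copy-with-flag pass (append every line, insert when the flag is unset and the docstring-end condition fires) by a locate-then-splice decomposition: first find the index of the first line beyond the first whose stripped text ends with triple-quote, then splice the three inserted lines in with list slicing.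
import Mathlib
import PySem

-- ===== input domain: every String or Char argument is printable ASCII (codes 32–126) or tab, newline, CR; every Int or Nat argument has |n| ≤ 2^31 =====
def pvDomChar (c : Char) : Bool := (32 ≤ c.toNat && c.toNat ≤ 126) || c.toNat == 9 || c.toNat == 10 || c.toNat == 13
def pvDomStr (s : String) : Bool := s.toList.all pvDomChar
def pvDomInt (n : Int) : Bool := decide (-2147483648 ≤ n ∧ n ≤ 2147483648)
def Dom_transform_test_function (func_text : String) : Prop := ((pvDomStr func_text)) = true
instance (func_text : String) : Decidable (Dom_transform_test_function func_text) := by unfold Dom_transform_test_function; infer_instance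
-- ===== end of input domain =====

-- B replaces A's copy-with-flag single pass by locate-then-splice (find the first
-- docstring-closing line, then split the list there); same return value, objective: alternative decomposition.

-- ===== PORT A =====
-- line.strip().endswith('"""')
def pvDocEnd (l : List Char) : Bool :=
  PySem.Chars.endswith (PySem.Chars.strip l) ['"', '"', '"']

-- the three lines appended after the docstring-closing line l
-- (indent = len(line) - len(line.lstrip()); ' ' * indent)
def pvIns (l : List Char) : List (List Char) :=
  let pad := List.replicate (l.length - (PySem.Chars.lstrip l).length) ' '
  [pad ++ "import json".toList, pad ++ "monkeypatch.chdir(tmp_path)".toList, []]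

-- A's for-loop over enumerate(lines) with the added_chdir flag and new_lines accumulator
def pvLoopA : List (List Char) → Nat → Bool → List (List Char) → List (List Char)
  | [], _, _, acc => acc
  | l :: rest, i, added, acc =>
    if !added && pvDocEnd l && decide (0 < i) then
      pvLoopA rest (i + 1) true ((acc ++ [l]) ++ pvIns l)
    else
      pvLoopA rest (i + 1) added (acc ++ [l])

def transform_test_function (func_text : String) : String :=
  let t := func_text.toList
  if !(PySem.Chars.isIn "tmp_path".toList t) || !(PySem.Chars.isIn "monkeypatch".toList t) then
    func_text
  else if PySem.Chars.isIn "monkeypatch.chdir(tmp_path)".toList t then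
    func_text
  else
    let lines := PySem.Chars.splitOn t ['\n']
    String.ofList (PySem.Chars.join ['\n'] (pvLoopA lines 0 false []))

-- ===== PORT B =====
-- next(((i, l) for i, l in enumerate(lines) if i > 0 and l.strip().endswith('"""')), None)
def pvLocate : List (List Char) → Nat → Option (Nat × List Char)
  | [], _ => none
  | l :: rest, i =>
    if decide (0 < i) && pvDocEnd l then some (i, l) else pvLocate rest (i + 1)

def transform_test_function_alt (func_text : String) : String :=
  let t := func_text.toList
  if !(PySem.Chars.isIn "tmp_path".toList t) || !(PySem.Chars.isIn "monkeypatch".toList t) then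
    func_text
  else if PySem.Chars.isIn "monkeypatch.chdir(tmp_path)".toList t then
    func_text
  else
    let lines := PySem.Chars.splitOn t ['\n']
    match pvLocate lines 0 with
    | none => String.ofList (PySem.Chars.join ['\n'] lines)
    | some (i, l) =>
        String.ofList (PySem.Chars.join ['\n']
          (lines.take (i + 1) ++ pvIns l ++ lines.drop (i + 1)))

-- ===== PRECONDITION & SPEC =====
def Spec_transform_test_function (func_text : String) (out : String) : Prop := out = transform_test_function_alt func_text
instance (func_text : String) (out : String) : Decidable (Spec_transform_test_function func_text out) := by unfold Spec_transform_test_function; infer_instance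

-- ===== CLAIM (what is proved, stated in full; the proofs are below) =====
def Claim_equal_transform_test_function : Prop := ∀ (func_text : String), Dom_transform_test_function func_text → Spec_transform_test_function func_text (transform_test_function func_text)

-- ===== LEMMAS AND PROOFS =====

lemma pvLocate_ge {lines : List (List Char)} {i j : Nat} {l : List Char}
    (h : pvLocate lines i = some (j, l)) : i ≤ j := by
  induction lines generalizing i with
  | nil => simp [pvLocate] at h
  | cons x rest ih =>
    simp only [pvLocate] at h
    split at h
    · simp at h; omega
    · have := ih h; omega

lemma pvLoopA_true (lines : List (List Char)) (i : Nat) (acc : List (List Char)) :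
    pvLoopA lines i true acc = acc ++ lines := by
  induction lines generalizing i acc with
  | nil => simp [pvLoopA]
  | cons x rest ih => simp [pvLoopA, ih]

lemma pvLoopA_eq_locate (lines : List (List Char)) (i : Nat) (hi : 1 ≤ i)
    (acc : List (List Char)) :
    pvLoopA lines i false acc =
      match pvLocate lines i with
      | none => acc ++ lines
      | some (j, l) =>
          acc ++ lines.take (j - i + 1) ++ pvIns l ++ lines.drop (j - i + 1) := by
  induction lines generalizing i acc with
  | nil => simp [pvLoopA, pvLocate]
  | cons x rest ih =>
    by_cases hc : pvDocEnd x = true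
    · have h0 : decide (0 < i) = true := by simp; omega
      simp only [pvLoopA, pvLocate, hc, h0, Bool.not_false, Bool.and_true, reduceIte]
      rw [pvLoopA_true]
      simp
    · simp only [pvLoopA, pvLocate, hc, Bool.and_false, Bool.not_false,
        Bool.false_and, Bool.false_eq_true, if_false]
      rw [ih (i + 1) (by omega)]
      cases hloc : pvLocate rest (i + 1) with
      | none => simp
      | some p =>
        obtain ⟨j, l⟩ := p
        have hj : i + 1 ≤ j := pvLocate_ge hloc
        have h1 : j - i = j - (i + 1) + 1 := by omega
        simp [h1]

-- ===== VERDICT (by name: the statement is the Claim_ definition above) =====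
theorem transform_test_function_spec : Claim_equal_transform_test_function := by
  intro func_text _
  unfold Spec_transform_test_function transform_test_function transform_test_function_alt
  simp only
  split_ifs with h1 h2
  · rfl
  · rfl
  · cases hlines : PySem.Chars.splitOn func_text.toList ['\n'] with
    | nil => simp [pvLoopA, pvLocate]
    | cons x rest =>
      have h0 : decide (0 < 0) = false := by simp
      simp only [pvLoopA, pvLocate, h0, Bool.and_false, Bool.false_and, Bool.not_false,
        Bool.true_and, Bool.false_eq_true, if_false, List.nil_append, Nat.zero_add]
      rw [pvLoopA_eq_locate rest 1 (by omega) [x]]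
      cases hloc : pvLocate rest 1 with
      | none => simp
      | some p =>
        obtain ⟨j, l⟩ := p
        have hj : 1 ≤ j := pvLocate_ge hloc
        have h1 : j + 1 = (j - 1 + 1) + 1 := by omega
        simp only [h1, List.take_succ_cons, List.drop_succ_cons]
        simp
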